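-- pv_equiv track=rewrite | github.com/lajurun/PAT | BasicLevel(Python)/1019.py | to_num
-- ===== SOURCE A (Python) =====
-- def to_num(num, h):
--     lst = []
--     for i in range(4):
--         lst.append(num % 10)
--         num //= 10
--
--     if h:
--         lst.sort(reverse=True)
--     else:
--         lst.sort()
--
--     return int("".join(map(str, lst)))
-- ===== SOURCE B (Python) =====
-- def to_num(num, h):
--     counts = [0] * 10
--     for i in range(4):
--         counts[num % 10] += 1
--         num //= 10
--     digits = []
--     for d in (range(9, -1, -1) if h else range(10)):
--         digits.extend([d] * counts[d])
--     return int("".join(map(str, digits)))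
-- ===== Notes on version B (the rewrite author's own statement) =====
-- stated objective: alternative
-- what changed: Replaces the comparison sort of the 4 extracted digits by a counting sort: digits are tallied into a 10-slot count table and the sorted digit sequence is emitted by scanning digit values 0..9 (or 9..0 for descending), then joined and parsed exactly as before.
import Mathlib
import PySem

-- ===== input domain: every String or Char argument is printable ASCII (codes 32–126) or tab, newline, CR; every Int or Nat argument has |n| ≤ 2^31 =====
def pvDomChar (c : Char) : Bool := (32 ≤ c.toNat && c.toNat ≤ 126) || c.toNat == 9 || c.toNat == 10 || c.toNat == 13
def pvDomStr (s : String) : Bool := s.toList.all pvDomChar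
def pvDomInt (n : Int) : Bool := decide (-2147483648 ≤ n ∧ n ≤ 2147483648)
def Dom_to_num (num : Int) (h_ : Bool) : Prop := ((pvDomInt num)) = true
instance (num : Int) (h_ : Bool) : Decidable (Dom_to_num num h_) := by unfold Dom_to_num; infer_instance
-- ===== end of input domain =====

-- B replaces the comparison sort of the four extracted digits by a counting sort
-- (tally into a 10-slot table, emit digit values in ascending/descending order);
-- the digit-extraction loop and the join/int(...) finish are unchanged.


-- ===== PORT A =====
-- int("".join(...)) always succeeds here (the joined string is four digit chars),
-- so PySem.Int.ofStr? is always `some`; `.getD 0` only unwraps it.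
def to_num (num : Int) (h_ : Bool) : Int :=
  let p := (PySem.List.pyRange 0 4 1).foldl
    (fun (s : List Int × Int) _ =>
      (s.1 ++ [PySem.Int.mod s.2 10], PySem.Int.floordiv s.2 10)) ([], num)
  let lst := if h_ then PySem.List.sorted p.1 (fun x => x) true
             else PySem.List.sorted p.1 (fun x => x) false
  (PySem.Int.ofStr? (PySem.Str.join "" (lst.map PySem.Int.toStr))).getD 0

-- ===== PORT B =====
def to_num_alt (num : Int) (h_ : Bool) : Int :=
  let p := (PySem.List.pyRange 0 4 1).foldl
    (fun (s : List Int × Int) _ =>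
      (PySem.List.pySetD s.1 (PySem.Int.mod s.2 10)
         (PySem.List.pyGetD s.1 (PySem.Int.mod s.2 10) 0 + 1),
       PySem.Int.floordiv s.2 10)) ([0,0,0,0,0,0,0,0,0,0], num)
  let digits := (if h_ then PySem.List.pyRange 9 (-1) (-1) else PySem.List.pyRange 0 10 1).foldl
    (fun acc d => acc ++ List.replicate (PySem.List.pyGetD p.1 d 0).toNat d) []
  (PySem.Int.ofStr? (PySem.Str.join "" (digits.map PySem.Int.toStr))).getD 0

-- ===== PRECONDITION & SPEC =====
def Spec_to_num (num : Int) (h_ : Bool) (out : Int) : Prop := out = to_num_alt num h_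
instance (num : Int) (h_ : Bool) (out : Int) : Decidable (Spec_to_num num h_ out) := by unfold Spec_to_num; infer_instance

-- ===== CLAIM (what is proved, stated in full; the proofs are below) =====
def Claim_equal_to_num : Prop := ∀ (num : Int) (h_ : Bool), Dom_to_num num h_ → Spec_to_num num h_ (to_num num h_)

-- ===== LEMMAS AND PROOFS =====

/-- The counting step of B: increment slot `x` of the tally. -/
def pvBump (cs : List Int) (x : Int) : List Int :=
  PySem.List.pySetD cs x (PySem.List.pyGetD cs x 0 + 1)

/-- After tallying the elements of `L` into `cs0`, slot `j` grew by the count of `j` in `L`. -/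
theorem pvBuild_getD (L : List Int) (cs0 : List Int)
    (hb : ∀ x ∈ L, 0 ≤ x ∧ x < (cs0.length : Int))
    (j : Int) (h0 : 0 ≤ j) (h1 : j < (cs0.length : Int)) :
    PySem.List.pyGetD (L.foldl pvBump cs0) j 0
      = PySem.List.pyGetD cs0 j 0 + (L.count j : Int) := by
  induction L generalizing cs0 with
  | nil => simp
  | cons x L ih =>
    obtain ⟨hx0, hx1⟩ := hb x (by simp)
    have hlen : ((pvBump cs0 x).length : Int) = cs0.length := by
      simp [pvBump, PySem.List.length_pySetD]
    rw [List.foldl_cons, ih (pvBump cs0 x) (by rw [hlen]; exact fun y hy => hb y (by simp [hy]))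
        (by rw [hlen]; exact h1)]
    have hxn : x.toNat < cs0.length := by omega
    have hjn : j.toNat < cs0.length := by omega
    rw [pvBump, PySem.List.pySetD_of_nonneg cs0 _ hx0,
        PySem.List.pyGetD_eq_getElem _ 0 h0 (by simp; omega),
        PySem.List.pyGetD_eq_getElem _ 0 h0 h1,
        PySem.List.pyGetD_eq_getElem _ 0 hx0 hx1,
        List.getElem_set]
    by_cases hxy : x = j
    · subst hxy
      simp
      ring
    · have : x.toNat ≠ j.toNat := by omega
      simp [this, hxy]

/-- The emission loop of B is the flatMap of per-value replicates. -/
theorem pvEmit_eq_flatMap (cs : List Int) (ds : List Int) :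
    ds.foldl (fun acc d => acc ++ List.replicate (PySem.List.pyGetD cs d 0).toNat d) []
      = ds.flatMap (fun d => List.replicate (PySem.List.pyGetD cs d 0).toNat d) := by
  simpa using PySem.List.foldl_append_eq_flatMap
    (fun d => List.replicate (PySem.List.pyGetD cs d 0).toNat d) ds []

/-- Emitting replicates along an ascending range is nondecreasing. -/
theorem pvFlat_pairwise (a b : Int) (f : Int → Nat) :
    ((PySem.List.pyRange a b 1).flatMap (fun d => List.replicate (f d) d)).Pairwise (· ≤ ·) := by
  by_cases hab : b ≤ a
  · rw [PySem.List.pyRange_one_eq_nil hab]; simp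
  · rw [PySem.List.pyRange_one_cons (by omega), List.flatMap_cons, List.pairwise_append]
    refine ⟨List.pairwise_replicate.2 (by simp), pvFlat_pairwise (a+1) b f, ?_⟩
    intro x hx y hy
    have hx' := List.eq_of_mem_replicate hx
    obtain ⟨d, hd, hyd⟩ := List.mem_flatMap.1 hy
    have := (PySem.List.mem_pyRange_one).1 hd
    have := List.eq_of_mem_replicate hyd
    omega
termination_by (b - a).toNat
decreasing_by omega

/-- Each value `x` occurs `f x` times in the emission (0 outside the range). -/
theorem pvFlat_count (a b : Int) (f : Int → Nat) (x : Int) :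
    ((PySem.List.pyRange a b 1).flatMap (fun d => List.replicate (f d) d)).count x
      = if a ≤ x ∧ x < b then f x else 0 := by
  by_cases hab : b ≤ a
  · rw [PySem.List.pyRange_one_eq_nil hab]
    simp; omega
  · rw [PySem.List.pyRange_one_cons (by omega), List.flatMap_cons, List.count_append,
        pvFlat_count (a+1) b f x, List.count_replicate]
    by_cases hxa : a = x
    · subst hxa; simp; omega
    · simp [hxa]
      split_ifs <;> omega
termination_by (b - a).toNat
decreasing_by omega

/-- The descending emission is the reverse of the ascending one. -/
theorem pvFlat_desc (f : Int → Nat) :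
    (PySem.List.pyRange 9 (-1) (-1)).flatMap (fun d => List.replicate (f d) d)
      = ((PySem.List.pyRange 0 10 1).flatMap (fun d => List.replicate (f d) d)).reverse := by
  have h : PySem.List.pyRange 9 (-1) (-1) = (PySem.List.pyRange 0 10 1).reverse := by
    simpa using PySem.List.pyRange_neg_one_eq_reverse 9 (-1)
  rw [h, List.flatMap_reverse]
  congr 1
  simp only [Function.comp_def, List.reverse_replicate]

/-- Core: for digits in [0,10), the counting-sort emission equals the comparison sort. -/
theorem pvCore (h_ : Bool) (L : List Int) (hb : ∀ x ∈ L, 0 ≤ x ∧ x < 10) :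
    (if h_ then PySem.List.sorted L (fun x => x) true else PySem.List.sorted L (fun x => x) false)
      = (if h_ then PySem.List.pyRange 9 (-1) (-1) else PySem.List.pyRange 0 10 1).foldl
          (fun acc d => acc ++ List.replicate
            (PySem.List.pyGetD (L.foldl pvBump [0,0,0,0,0,0,0,0,0,0]) d 0).toNat d) [] := by
  set cs := L.foldl pvBump ([0,0,0,0,0,0,0,0,0,0] : List Int) with hcs
  have hcnt : ∀ j : Int, 0 ≤ j → j < 10 → PySem.List.pyGetD cs j 0 = (L.count j : Int) := by
    intro j h0 h1
    rw [hcs, pvBuild_getD L _ (by simpa using hb) j h0 (by simp; omega)]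
    have h := PySem.List.pyGetD_mem ([0,0,0,0,0,0,0,0,0,0] : List Int) (i := j) 0
      (by constructor <;> simp <;> omega)
    simp at h
    rw [h]; ring
  set F : Int → List Int := fun d => List.replicate (PySem.List.pyGetD cs d 0).toNat d with hF
  have hcount : ∀ x : Int, ((PySem.List.pyRange 0 10 1).flatMap F).count x = L.count x := by
    intro x
    rw [hF, pvFlat_count 0 10 (fun d => (PySem.List.pyGetD cs d 0).toNat) x]
    by_cases hx : 0 ≤ x ∧ x < 10
    · rw [if_pos hx, hcnt x hx.1 hx.2]; simp
    · rw [if_neg hx]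
      symm
      rw [List.count_eq_zero]
      intro hmem
      exact hx ⟨(hb x hmem).1, (hb x hmem).2⟩
  have hperm : ((PySem.List.pyRange 0 10 1).flatMap F).Perm L := by
    rw [List.perm_iff_count]; intro x; rw [hcount x]
  have hpair : ((PySem.List.pyRange 0 10 1).flatMap F).Pairwise (· ≤ ·) :=
    pvFlat_pairwise 0 10 _
  cases h_ with
  | false =>
    simp only [if_false, Bool.false_eq_true]
    rw [pvEmit_eq_flatMap]
    exact PySem.List.sorted_id_eq_of_perm_of_pairwise L _ hperm hpair
  | true =>
    simp only [if_true]
    rw [pvEmit_eq_flatMap]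
    have hdesc : (PySem.List.pyRange 9 (-1) (-1)).flatMap F
        = ((PySem.List.pyRange 0 10 1).flatMap F).reverse := pvFlat_desc _
    rw [hdesc]
    have hperm' : (PySem.List.sorted L (fun x => x) true).Perm
        (((PySem.List.pyRange 0 10 1).flatMap F).reverse) :=
      (PySem.List.sorted_perm L _ true).trans
        (hperm.symm.trans ((List.reverse_perm _).symm))
    have hp1 : (PySem.List.sorted L (fun x => x) true).Pairwise (fun p q : Int => q ≤ p) :=
      PySem.List.sorted_pairwise_rev L _
    have hp2 : (((PySem.List.pyRange 0 10 1).flatMap F).reverse).Pairwise (fun p q : Int => q ≤ p) := by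
      rw [List.pairwise_reverse]
      exact hpair
    exact hperm'.eq_of_pairwise (fun p q _ _ hpq hqp => le_antisymm hqp hpq) hp1 hp2

theorem pvRange4 : PySem.List.pyRange 0 4 1 = [0,1,2,3] := by decide

set_option maxHeartbeats 1000000 in
theorem pvMain (num : Int) (h_ : Bool) : to_num num h_ = to_num_alt num h_ := by
  unfold to_num to_num_alt
  rw [pvRange4]
  simp only [List.foldl_cons, List.foldl_nil]
  set m0 := PySem.Int.mod num 10 with hm0
  set n1 := PySem.Int.floordiv num 10 with hn1
  set m1 := PySem.Int.mod n1 10 with hm1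
  set n2 := PySem.Int.floordiv n1 10 with hn2
  set m2 := PySem.Int.mod n2 10 with hm2
  set n3 := PySem.Int.floordiv n2 10 with hn3
  set m3 := PySem.Int.mod n3 10 with hm3
  have hb : ∀ x ∈ [m0, m1, m2, m3], 0 ≤ x ∧ x < 10 := by
    intro x hx
    simp at hx
    rcases hx with h | h | h | h <;> subst h <;>
      exact ⟨PySem.Int.mod_nonneg _ (by norm_num), PySem.Int.mod_lt _ (by norm_num)⟩
  have h := pvCore h_ [m0, m1, m2, m3] hb
  simp only [List.foldl_cons, List.foldl_nil, pvBump] at h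
  simp only [List.nil_append, List.cons_append] at *
  rw [h]

-- ===== VERDICT (by name: the statement is the Claim_ definition above) =====
theorem to_num_spec : Claim_equal_to_num := by
  intro num h_ _
  unfold Spec_to_num
  exact pvMain num h_
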